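-- pv_equiv track=rewrite | github.com/mengistic/sida-2022 | code.py | freeze_2
-- ===== SOURCE A (Python) =====
-- def freeze_2(T):
--     L = len(T)
--     counter, length = 0, 0
--     assignment = 0
--
--     for i in range(L):
--         if T[i]>=0: counter=0
--         else:
--             counter+=1
--             if( i>=L-1 or T[i+1]>=0  and length<counter):
--                 assignment += 1
--                 length=counter
--
--     return assignment
-- ===== SOURCE B (Python) =====
-- def freeze_2(T):
--     # Phase 1: decompose T into maximal runs of negative values,
--     # recording each run's length and whether it touches the end of T.
--     runs = []
--     c = 0
--     for x in T:
--         if x < 0: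
--             c += 1
--         else:
--             if c > 0:
--                 runs.append((c, False))
--             c = 0
--     if c > 0:
--         runs.append((c, True))
--     # Phase 2: scan the runs keeping the best counted length.
--     best = 0
--     count = 0
--     for rl, touches in runs:
--         if touches or rl > best:
--             count += 1
--             best = rl
--     return count
-- ===== Notes on version B (the rewrite author's own statement) =====
-- stated objective: alternative
-- what changed: A's single fused index scan with lookahead T[i+1] is replaced by a two-phase decomposition: first build the list of maximal negative runs (length, touches-end), then scan the runs with a running best (a run counts when it is a new strict maximum, and the end-touching run always counts).
import Mathlib
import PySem

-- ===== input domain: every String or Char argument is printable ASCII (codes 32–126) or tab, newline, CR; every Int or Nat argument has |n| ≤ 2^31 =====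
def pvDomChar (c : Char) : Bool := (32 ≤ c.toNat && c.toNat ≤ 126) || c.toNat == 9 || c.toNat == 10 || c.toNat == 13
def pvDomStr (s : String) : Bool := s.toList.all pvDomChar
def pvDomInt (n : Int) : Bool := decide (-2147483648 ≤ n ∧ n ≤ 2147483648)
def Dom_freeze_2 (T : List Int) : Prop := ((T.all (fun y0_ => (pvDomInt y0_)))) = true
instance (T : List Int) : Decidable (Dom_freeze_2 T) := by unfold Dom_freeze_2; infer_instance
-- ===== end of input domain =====

-- B replaces A's fused index scan (with T[i+1] lookahead) by a two-phase decomposition: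
-- build the maximal negative runs, then scan them with a running best (alternative, same cost).

-- ===== PORT A =====
-- step of A's for-loop: state (counter, length, assignment); indices are in range, so
-- pyGetD is exact for T[i]; T[i+1] is only consulted when i < L-1 (Python's 'or' short-circuits,
-- and so does the disjunction here since i ≥ L-1 decides the branch first).
def stepA (T : List Int) (st : Int × Int × Int) (i : Int) : Int × Int × Int :=
  let counter := st.1; let length := st.2.1; let assignment := st.2.2
  if 0 ≤ PySem.List.pyGetD T i 0 then (0, length, assignment)
  else
    let counter := counter + 1
    if (T.length : Int) - 1 ≤ i ∨ (0 ≤ PySem.List.pyGetD T (i + 1) 0 ∧ length < counter)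
    then (counter, counter, assignment + 1)
    else (counter, length, assignment)

def freeze_2 (T : List Int) : Int :=
  ((PySem.List.pyRange 0 (T.length : Int) 1).foldl (stepA T) (0, 0, 0)).2.2

-- ===== PORT B =====
-- phase 1 loop body: state (runs, c)
def stepRuns (st : List (Int × Bool) × Int) (x : Int) : List (Int × Bool) × Int :=
  if x < 0 then (st.1, st.2 + 1)
  else (if st.2 > 0 then st.1 ++ [(st.2, false)] else st.1, 0)

-- phase 2 loop body: state (best, count)
def stepTally (st : Int × Int) (r : Int × Bool) : Int × Int :=
  if r.2 = true ∨ r.1 > st.1 then (r.1, st.2 + 1) else st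

def freeze_2_alt (T : List Int) : Int :=
  let p := T.foldl stepRuns ([], 0)
  let runs := if p.2 > 0 then p.1 ++ [(p.2, true)] else p.1
  (runs.foldl stepTally (0, 0)).2

-- ===== PRECONDITION & SPEC =====
def Spec_freeze_2 (T : List Int) (out : Int) : Prop := out = freeze_2_alt T
instance (T : List Int) (out : Int) : Decidable (Spec_freeze_2 T out) := by unfold Spec_freeze_2; infer_instance

-- ===== CLAIM (what is proved, stated in full; the proofs are below) =====
def Claim_equal_freeze_2 : Prop := ∀ (T : List Int), Dom_freeze_2 T → Spec_freeze_2 T (freeze_2 T)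

-- ===== LEMMAS AND PROOFS =====

-- structural reference for A's loop (recursion over the suffix, with lookahead)
def loopRec : List Int → Int → Int → Int → Int
  | [], _, _, a => a
  | x :: xs, c, b, a =>
    if 0 ≤ x then loopRec xs 0 b a
    else
      match xs with
      | [] => a + 1
      | y :: _ =>
        if 0 ≤ y ∧ b < c + 1 then loopRec xs (c + 1) (c + 1) (a + 1)
        else loopRec xs (c + 1) b a

-- structural reference for B's phase 1 (maximal negative runs with carry c)
def scanRuns : List Int → Int → List (Int × Bool)
  | [], c => if c > 0 then [(c, true)] else []
  | x :: xs, c =>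
    if x < 0 then scanRuns xs (c + 1)
    else if c > 0 then (c, false) :: scanRuns xs 0 else scanRuns xs 0

-- structural reference for B's phase 2
def tally : List (Int × Bool) → Int → Int
  | [], _ => 0
  | r :: rs, b => if r.2 = true ∨ r.1 > b then 1 + tally rs r.1 else tally rs b

lemma bridgeA (T : List Int) :
    ∀ (suf pre : List Int) (c b a : Int), T = pre ++ suf →
      ((PySem.List.pyRange (pre.length : Int) (T.length : Int) 1).foldl (stepA T) (c, b, a)).2.2
        = loopRec suf c b a := by
  intro suf
  induction suf with
  | nil =>
    intro pre c b a hT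
    subst hT
    rw [PySem.List.pyRange_one_eq_nil (by simp)]
    simp [loopRec]
  | cons x xs ih =>
    intro pre c b a hT
    have hlenN : T.length = pre.length + xs.length + 1 := by rw [hT]; simp; omega
    have hx : PySem.List.pyGetD T (pre.length : Int) 0 = x := by
      rw [hT, PySem.List.pyGetD_natCast]
      simp [List.getD]
    have hcons : PySem.List.pyRange (pre.length : Int) (T.length : Int) 1
        = (pre.length : Int) :: PySem.List.pyRange ((pre.length : Int) + 1) (T.length : Int) 1 :=
      PySem.List.pyRange_one_cons (by omega)
    rw [hcons, List.foldl_cons]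
    have ihx : ∀ c b a : Int,
        ((PySem.List.pyRange ((pre.length : Int) + 1) (T.length : Int) 1).foldl
          (stepA T) (c, b, a)).2.2 = loopRec xs c b a := by
      intro c b a
      have h := ih (pre ++ [x]) c b a (by rw [hT]; simp)
      rw [show (((pre ++ [x]).length : Nat) : Int) = (pre.length : Int) + 1 by
        simp] at h
      exact h
    by_cases hxe : 0 ≤ x
    · have h1 : stepA T (c, b, a) (pre.length : Int) = (0, b, a) := by
        simp only [stepA, hx]; rw [if_pos hxe]
      rw [h1, ihx]
      simp only [loopRec]; rw [if_pos hxe]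
    · cases xs with
      | nil =>
        have h1 : stepA T (c, b, a) (pre.length : Int) = (c + 1, c + 1, a + 1) := by
          simp only [stepA, hx]
          rw [if_neg hxe, if_pos (Or.inl (by simp at hlenN; omega))]
        have hnil : PySem.List.pyRange ((pre.length : Int) + 1) (T.length : Int) 1 = [] :=
          PySem.List.pyRange_one_eq_nil (by simp at hlenN; omega)
        rw [h1, hnil]
        simp only [List.foldl_nil, loopRec]
        rw [if_neg hxe]
      | cons y ys =>
        have hy : PySem.List.pyGetD T ((pre.length : Int) + 1) 0 = y := by
          rw [show T = (pre ++ [x]) ++ y :: ys by rw [hT]; simp]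
          rw [show ((pre.length : Int) + 1) = (((pre ++ [x]).length : Nat) : Int) by simp]
          rw [PySem.List.pyGetD_natCast]
          simp [List.getD]
        have hnl : ¬ ((T.length : Int) - 1 ≤ (pre.length : Int)) := by
          simp at hlenN; omega
        by_cases hcnt : 0 ≤ y ∧ b < c + 1
        · have h1 : stepA T (c, b, a) (pre.length : Int) = (c + 1, c + 1, a + 1) := by
            simp only [stepA, hx, hy]
            rw [if_neg hxe, if_pos (Or.inr hcnt)]
          rw [h1, ihx]
          simp only [loopRec]; rw [if_neg hxe, if_pos hcnt]
        · have h1 : stepA T (c, b, a) (pre.length : Int) = (c + 1, b, a) := by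
            simp only [stepA, hx, hy]
            rw [if_neg hxe, if_neg (not_or.mpr ⟨hnl, hcnt⟩)]
          rw [h1, ihx]
          simp only [loopRec]; rw [if_neg hxe, if_neg hcnt]

lemma A_eq_loopRec (T : List Int) : freeze_2 T = loopRec T 0 0 0 := by
  have := bridgeA T T [] 0 0 0 (by simp)
  simpa [freeze_2] using this

lemma runsFold : ∀ (xs : List Int) (rs : List (Int × Bool)) (c : Int),
    (if (xs.foldl stepRuns (rs, c)).2 > 0
      then (xs.foldl stepRuns (rs, c)).1 ++ [((xs.foldl stepRuns (rs, c)).2, true)]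
      else (xs.foldl stepRuns (rs, c)).1) = rs ++ scanRuns xs c := by
  intro xs
  induction xs with
  | nil =>
    intro rs c
    by_cases h : c > 0 <;> simp [scanRuns, h]
  | cons x xs ih =>
    intro rs c
    simp only [List.foldl_cons, stepRuns]
    by_cases hx : x < 0
    · simp only [if_pos hx]
      rw [ih rs (c + 1)]
      simp [scanRuns, hx]
    · simp only [if_neg hx]
      by_cases hc : c > 0
      · simp only [if_pos hc]
        rw [ih (rs ++ [(c, false)]) 0]
        simp [scanRuns, hx, hc]
      · simp only [if_neg hc]
        rw [ih rs 0]
        simp [scanRuns, hx, hc]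

lemma tallyFold : ∀ (rs : List (Int × Bool)) (b k : Int),
    (rs.foldl stepTally (b, k)).2 = k + tally rs b := by
  intro rs
  induction rs with
  | nil => intro b k; simp [tally]
  | cons r rs ih =>
    intro b k
    simp only [List.foldl_cons, stepTally, tally]
    by_cases h : r.2 = true ∨ r.1 > b
    · simp only [if_pos h]; rw [ih]; ring
    · simp only [if_neg h]; rw [ih]

lemma B_eq_tally (T : List Int) : freeze_2_alt T = tally (scanRuns T 0) 0 := by
  unfold freeze_2_alt
  have h := runsFold T [] 0
  simp only [List.nil_append] at h
  simp only [← h]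
  rw [tallyFold]; ring

-- the condition carried by the main invariant
def condInv : List Int → Int → Int → Prop
  | [], c, _ => c = 0
  | y :: _, c, b => 0 ≤ y → c ≤ b

lemma mainInv : ∀ (xs : List Int) (c b a : Int), 0 ≤ c → 0 ≤ b → condInv xs c b →
    loopRec xs c b a = a + tally (scanRuns xs c) b := by
  intro xs
  induction xs with
  | nil =>
    intro c b a hc hb hcond
    have : c = 0 := hcond
    simp [loopRec, scanRuns, tally, this]
  | cons x xs ih =>
    intro c b a hc hb hcond
    by_cases hx : 0 ≤ x
    · have hxlt : ¬ x < 0 := by omega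
      have hcb : c ≤ b := hcond hx
      have hcond' : condInv xs 0 b := by
        cases xs with
        | nil => simp [condInv]
        | cons y ys => intro _; exact hb
      rw [show loopRec (x :: xs) c b a = loopRec xs 0 b a by simp [loopRec, hx]]
      rw [ih 0 b a le_rfl hb hcond']
      by_cases hcpos : c > 0
      · have hne : ¬ ((c, false).2 = true ∨ (c, false).1 > b) := by simp; omega
        rw [show scanRuns (x :: xs) c = (c, false) :: scanRuns xs 0 by
          simp [scanRuns, hxlt, hcpos]]
        rw [show tally ((c, false) :: scanRuns xs 0) b = tally (scanRuns xs 0) b by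
          simp only [tally]; rw [if_neg hne]]
      · simp [scanRuns, hxlt, hcpos]
    · have hxlt : x < 0 := by omega
      cases xs with
      | nil =>
        have : loopRec [x] c b a = a + 1 := by simp [loopRec, hx]
        rw [this]
        have hc1 : c + 1 > 0 := by omega
        simp [scanRuns, hxlt, hc1, tally]
      | cons y ys =>
        by_cases hcnt : 0 ≤ y ∧ b < c + 1
        · have hstep : loopRec (x :: y :: ys) c b a = loopRec (y :: ys) (c+1) (c+1) (a+1) := by
            simp [loopRec, hx, hcnt.1, hcnt.2]
          rw [hstep, ih (c+1) (c+1) (a+1) (by omega) (by omega) (fun _ => le_rfl)]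
          by_cases hy : y < 0
          · omega  -- contradiction with hcnt.1
          · have hc1 : c + 1 > 0 := by omega
            have hnb : ¬ ((c+1, false).2 = true ∨ (c+1, false).1 > c + 1) := by simp
            have hyb : ((c+1, false).2 = true ∨ (c+1, false).1 > b) := by simp; omega
            simp only [scanRuns, if_pos hxlt, if_neg hy, if_pos hc1]
            rw [show tally ((c+1, false) :: scanRuns ys 0) (c+1)
                  = tally (scanRuns ys 0) (c+1) by simp only [tally]; rw [if_neg hnb]]
            rw [show tally ((c+1, false) :: scanRuns ys 0) b
                  = 1 + tally (scanRuns ys 0) (c+1) by simp only [tally]; rw [if_pos hyb]]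
            ring
        · have hstep : loopRec (x :: y :: ys) c b a = loopRec (y :: ys) (c+1) b a := by
            simp only [loopRec, if_neg hx, if_neg hcnt]
          have hcond' : condInv (y :: ys) (c+1) b := by
            intro hy; omega
          rw [hstep, ih (c+1) b a (by omega) hb hcond']
          simp [scanRuns, hxlt]

-- ===== VERDICT (by name: the statement is the Claim_ definition above) =====
theorem freeze_2_spec : Claim_equal_freeze_2 := by
  intro T _
  unfold Spec_freeze_2
  rw [A_eq_loopRec, B_eq_tally]
  have hcond : condInv T 0 0 := by
    cases T with
    | nil => simp [condInv]
    | cons y ys => intro _; exact le_rfl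
  rw [mainInv T 0 0 0 le_rfl le_rfl hcond]
  simp
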